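-- pv_equiv track=rewrite | github.com/caleb-fringer/aoc2025 | day3/solution.py | getMaxJoltageOne
-- ===== SOURCE A (Python) =====
-- def getMaxJoltageOne(bank):
--     stack = []
--     for i in range(len(bank)-1):
--         while len(stack) > 0 and bank[i] > stack[-1]:
--             stack.pop()
--         stack.append(bank[i])
--
--     if len(stack) < 2:
--         return 10*stack[0] + bank[-1]
--     else:
--         return 10*stack[0] + max(bank[-1], stack[1])
-- ===== SOURCE B (Python) =====
-- def getMaxJoltageOne(bank):
--     prefix = bank[:-1]
--     m = prefix[0]
--     idx = 0
--     for i in range(1, len(prefix)):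
--         if prefix[i] > m:
--             m = prefix[i]
--             idx = i
--     return 10 * m + max(bank[idx + 1:])
-- ===== Notes on version B (the rewrite author's own statement) =====
-- stated objective: simpler
-- what changed: Replaces the monotonic-stack traversal with a single-pass argmax over bank[:-1] (first occurrence of the maximum) followed by a builtin max over the remaining suffix, avoiding all stack pushes/pops.
-- outside the precondition, e.g. on getMaxJoltageOne([0]): A raises IndexError, B raises IndexError
import Mathlib
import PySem

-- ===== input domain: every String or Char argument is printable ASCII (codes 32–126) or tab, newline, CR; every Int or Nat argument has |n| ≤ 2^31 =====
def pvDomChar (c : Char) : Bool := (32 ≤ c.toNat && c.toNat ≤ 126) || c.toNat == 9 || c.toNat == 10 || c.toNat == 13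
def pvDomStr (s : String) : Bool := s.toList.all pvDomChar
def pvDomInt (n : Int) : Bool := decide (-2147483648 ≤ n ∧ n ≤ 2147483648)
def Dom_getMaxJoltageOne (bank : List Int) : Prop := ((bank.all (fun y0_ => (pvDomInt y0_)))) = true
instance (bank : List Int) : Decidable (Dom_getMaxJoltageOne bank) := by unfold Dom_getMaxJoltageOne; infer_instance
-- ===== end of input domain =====

-- B replaces A's monotonic-stack traversal by a single-pass argmax over bank[:-1] plus a
-- builtin max over the remaining suffix (objective: simpler; a timing run measured it faster).

-- ===== PORT A =====
-- The Python stack is stored TOP-FIRST (head = stack[-1]); append = cons, pop = tail.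
-- popLoop is the inner 'while len(stack) > 0 and bank[i] > stack[-1]: stack.pop()'.
def popLoop (x : Int) : List Int → List Int
  | [] => []
  | t :: rest => if x > t then popLoop x rest else t :: rest

def getMaxJoltageOne (bank : List Int) : Int :=
  let stack := (PySem.List.pyRange 0 ((bank.length : Int) - 1) 1).foldl
    (fun st i => PySem.List.pyGetD bank i 0 :: popLoop (PySem.List.pyGetD bank i 0) st) []
  let lastv := PySem.List.pyGetD bank (-1) 0          -- bank[-1]
  if stack.length < 2 then
    10 * stack.getLastD 0 + lastv                      -- stack[0] = bottom = last of top-first list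
  else
    10 * stack.getLastD 0 + max lastv (PySem.List.pyGetD stack.reverse 1 0)   -- stack[1]

-- ===== PORT B =====
def getMaxJoltageOne_alt (bank : List Int) : Int :=
  let pre := PySem.List.slice bank none (some (-1))          -- bank[:-1]
  let r := (PySem.List.pyRange 1 (pre.length : Int) 1).foldl
    (fun (s : Int × Int) i =>
      if PySem.List.pyGetD pre i 0 > s.1 then (PySem.List.pyGetD pre i 0, i) else s)
    (PySem.List.pyGetD pre 0 0, 0)                           -- (m, idx) = (prefix[0], 0)
  10 * r.1 + (PySem.List.max? (PySem.List.slice bank (some (r.2 + 1)) none) (fun y => y)).getD 0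

-- ===== PRECONDITION & SPEC =====
-- Pre_ excludes exactly the inputs on which Python A raises (IndexError on stack[0] when len(bank) < 2).
def Pre_getMaxJoltageOne (bank : List Int) : Prop := 2 ≤ bank.length
instance (bank : List Int) : Decidable (Pre_getMaxJoltageOne bank) := by unfold Pre_getMaxJoltageOne; infer_instance
def pvWitness_getMaxJoltageOne : List Int := [3, 1, 4, 1, 5]

def Spec_getMaxJoltageOne (bank : List Int) (out : Int) : Prop := out = getMaxJoltageOne_alt bank
instance (bank : List Int) (out : Int) : Decidable (Spec_getMaxJoltageOne bank out) := by unfold Spec_getMaxJoltageOne; infer_instance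

-- ===== CLAIM (what is proved, stated in full; the proofs are below) =====
def Claim_equal_getMaxJoltageOne : Prop := ∀ (bank : List Int), Dom_getMaxJoltageOne bank → Pre_getMaxJoltageOne bank → Spec_getMaxJoltageOne bank (getMaxJoltageOne bank)

-- ===== LEMMAS AND PROOFS =====

-- records of L: elements of L that are ≥ every later element (bottom-first final stack of A)
def recs : List Int → List Int
  | [] => []
  | x :: xs => match recs xs with
    | [] => [x]
    | y :: ys => if y ≤ x then x :: y :: ys else y :: ys

-- first maximum of L: (value, index of its first occurrence), none iff L = []
def fm? : List Int → Option (Int × Nat)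
  | [] => none
  | x :: xs => match fm? xs with
    | none => some (x, 0)
    | some (m, j) => if m ≤ x then some (x, 0) else some (m, j + 1)

-- B's scanning loop as a structural recursion (k = index of the head of the remaining list)
def bscan : List Int → Int × Int → Int → Int × Int
  | [], s, _ => s
  | x :: xs, s, k => bscan xs (if x > s.1 then (x, k) else s) (k + 1)

theorem popLoop_eq_dropWhile (x : Int) (st : List Int) :
    popLoop x st = st.dropWhile (fun t => decide (t < x)) := by
  induction st with
  | nil => rfl
  | cons t rest ih =>
    simp only [popLoop, List.dropWhile_cons]
    by_cases h : t < x
    · simp [h, ih]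
    · simp [h]

theorem dropWhile_lt_dropWhile_lt (x M : Int) (h : x ≤ M) (st : List Int) :
    (st.dropWhile (fun t => decide (t < x))).dropWhile (fun t => decide (t < M))
      = st.dropWhile (fun t => decide (t < M)) := by
  induction st with
  | nil => rfl
  | cons t rest ih =>
    by_cases hx : t < x
    · have hM : t < M := lt_of_lt_of_le hx h
      simp [hx, hM, ih]
    · simp [List.dropWhile_cons, hx]

theorem fm?_eq_none_iff (L : List Int) : fm? L = none ↔ L = [] := by
  cases L with
  | nil => simp [fm?]
  | cons x xs =>
    simp only [fm?]
    cases h : fm? xs with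
    | none => simp
    | some p => obtain ⟨m, j⟩ := p; by_cases hm : m ≤ x <;> simp [hm]

theorem fm?_index_lt (L : List Int) (m : Int) (j : Nat) (h : fm? L = some (m, j)) :
    j < L.length := by
  induction L generalizing m j with
  | nil => simp [fm?] at h
  | cons x xs ih =>
    simp only [fm?] at h
    cases hx : fm? xs with
    | none => rw [hx] at h; simp at h; simp; omega
    | some p =>
      obtain ⟨mx, jx⟩ := p
      rw [hx] at h
      by_cases hm : mx ≤ x
      · simp [hm] at h; simp; omega
      · simp [hm] at h
        have := ih mx jx hx
        simp; omega

theorem fm?_isMax (L : List Int) (m : Int) (j : Nat) (h : fm? L = some (m, j)) :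
    m ∈ L ∧ ∀ y ∈ L, y ≤ m := by
  induction L generalizing m j with
  | nil => simp [fm?] at h
  | cons x xs ih =>
    simp only [fm?] at h
    cases hx : fm? xs with
    | none =>
      rw [hx] at h
      have : xs = [] := (fm?_eq_none_iff xs).mp hx
      subst this
      simp at h
      simp [h.1]
    | some p =>
      obtain ⟨mx, jx⟩ := p
      rw [hx] at h
      obtain ⟨hmem, hle⟩ := ih mx jx hx
      by_cases hm : mx ≤ x
      · simp [hm] at h
        refine ⟨by simp [← h.1], ?_⟩
        intro y hy
        rcases List.mem_cons.mp hy with rfl | hy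
        · omega
        · have := hle y hy; omega
      · simp [hm] at h
        refine ⟨by rw [← h.1]; exact List.mem_cons_of_mem x hmem, ?_⟩
        intro y hy
        rcases List.mem_cons.mp hy with rfl | hy
        · omega
        · have := hle y hy; omega

-- key structural fact: recs L = max :: recs of the part after the first maximum
theorem recs_eq_fm (L : List Int) (m : Int) (j : Nat) (h : fm? L = some (m, j)) :
    recs L = m :: recs (L.drop (j + 1)) := by
  induction L generalizing m j with
  | nil => simp [fm?] at h
  | cons x xs ih =>
    simp only [fm?] at h
    cases hx : fm? xs with
    | none =>
      rw [hx] at h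
      have hxs : xs = [] := (fm?_eq_none_iff xs).mp hx
      subst hxs
      simp at h
      simp [recs, ← h.1, ← h.2]
    | some p =>
      obtain ⟨mx, jx⟩ := p
      rw [hx] at h
      have hrec := ih mx jx hx
      by_cases hm : mx ≤ x
      · simp [hm] at h
        obtain ⟨h1, h2⟩ := h
        subst h1; subst h2
        simp only [recs, hrec, List.drop_succ_cons, List.drop_zero]
        simp [hm, ← hrec]
      · simp [hm] at h
        obtain ⟨h1, h2⟩ := h
        subst h1; subst h2
        simp only [recs, hrec]
        simp only [show ¬ mx ≤ x from hm, if_false]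
        rw [← hrec, hrec, List.drop_succ_cons]

-- A's stack after processing L, started from any stack st (top-first)
theorem stackA_char (L : List Int) (st : List Int) (hL : L ≠ []) :
    L.foldl (fun st x => x :: popLoop x st) st
      = (recs L).reverse ++ st.dropWhile (fun t => decide (t < (recs L).headD 0)) := by
  induction L generalizing st with
  | nil => exact absurd rfl hL
  | cons x xs ih =>
    simp only [List.foldl_cons]
    by_cases hxs : xs = []
    · subst hxs
      simp [recs, popLoop_eq_dropWhile]
    · rw [ih _ hxs]
      obtain ⟨p, hp⟩ : ∃ p, fm? xs = some p := by
        cases h : fm? xs with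
        | none => exact absurd ((fm?_eq_none_iff xs).mp h) hxs
        | some p => exact ⟨p, rfl⟩
      obtain ⟨mx, jx⟩ := p
      have hrx : recs xs = mx :: recs (xs.drop (jx + 1)) := recs_eq_fm xs mx jx hp
      by_cases hm : mx ≤ x
      · -- x stays below nothing: x becomes the new bottom record
        have hrL : recs (x :: xs) = x :: recs xs := by
          simp only [recs, hrx]; simp [hm, ← hrx]
        rw [hrL, hrx]
        simp only [List.headD_cons, popLoop_eq_dropWhile]
        rw [List.dropWhile_cons]
        simp only [show ¬ (x < mx) from by omega, decide_false, Bool.false_eq_true, if_false]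
        simp only [List.reverse_cons, List.append_assoc, List.cons_append, List.nil_append]
        rfl
      · -- x < max xs: x is eventually popped
        have hrL : recs (x :: xs) = recs xs := by
          simp only [recs, hrx]; simp [hm, ← hrx]
        rw [hrL, hrx]
        simp only [List.headD_cons, popLoop_eq_dropWhile]
        rw [List.dropWhile_cons]
        simp only [show (x < mx) from by omega, decide_true, if_true]
        have hcomp := dropWhile_lt_dropWhile_lt x mx (by omega) st
        exact congrArg (fun z => (mx :: recs (List.drop (jx + 1) xs)).reverse ++ z) hcomp

-- B's index loop equals bscan
theorem bfold_eq_bscan (p : List Int) (a : Int) (ha : 0 ≤ a) (s : Int × Int) :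
    (PySem.List.pyRange a (p.length : Int) 1).foldl
      (fun (s : Int × Int) i =>
        if PySem.List.pyGetD p i 0 > s.1 then (PySem.List.pyGetD p i 0, i) else s) s
      = bscan (p.drop a.toNat) s a := by
  obtain ⟨n, hn⟩ : ∃ n, n = p.length - a.toNat := ⟨_, rfl⟩
  induction n generalizing a s with
  | zero =>
    rw [PySem.List.pyRange_one_eq_nil (by omega)]
    rw [List.drop_eq_nil_of_le (by omega)]
    rfl
  | succ n ihn =>
    have hlt : a < (p.length : Int) := by omega
    rw [PySem.List.pyRange_one_cons hlt]
    simp only [List.foldl_cons]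
    have hget : PySem.List.pyGetD p a 0 = p[a.toNat] :=
      PySem.List.pyGetD_eq_getElem p 0 ha hlt
    have hdrop : p.drop a.toNat = p[a.toNat] :: p.drop (a.toNat + 1) :=
      List.drop_eq_getElem_cons (by omega)
    rw [hget, hdrop]
    simp only [bscan]
    have hrec := ihn (a + 1) (by omega)
      (if p[a.toNat] > s.1 then (p[a.toNat], a) else s) (by omega)
    rw [show (a + 1).toNat = a.toNat + 1 by omega] at hrec
    exact hrec

-- bscan in terms of fm?
theorem bscan_eq_fm (xs : List Int) (m idx k : Int) :
    bscan xs (m, idx) k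
      = match fm? xs with
        | none => (m, idx)
        | some (mv, j) => if mv > m then (mv, k + (j : Int)) else (m, idx) := by
  induction xs generalizing m idx k with
  | nil => simp [bscan, fm?]
  | cons y ys ih =>
    simp only [bscan, fm?]
    cases hy : fm? ys with
    | none =>
      have : ys = [] := (fm?_eq_none_iff ys).mp hy
      subst this
      by_cases h : y > m <;> simp [bscan, h]
    | some p =>
      obtain ⟨mv, j⟩ := p
      by_cases h : y > m
      · rw [if_pos h, ih y k (k + 1)]
        rw [hy]
        by_cases hm : mv ≤ y
        · simp only [hm, if_true]
          simp [show ¬ (mv > y) from by omega, h]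
        · simp only [hm, if_false]
          simp only [show mv > y from by omega, if_true]
          simp only [show mv > m from by omega, if_true]
          congr 1
          push_cast
          ring
      · rw [if_neg h, ih m idx (k + 1)]
        rw [hy]
        by_cases hm : mv ≤ y
        · simp only [hm, if_true]
          simp [show ¬ (mv > m) from by omega, h]
        · simp only [hm, if_false]
          by_cases h2 : mv > m
          · simp only [h2, if_true]
            congr 1
            push_cast
            ring
          · simp [h2]

-- what B's loop computes on L = x :: xs: the first maximum of L and its index
theorem bscan_fm (x : Int) (xs : List Int) (m : Int) (j : Nat)
    (h : fm? (x :: xs) = some (m, j)) :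
    bscan xs (x, 0) 1 = (m, (j : Int)) := by
  rw [bscan_eq_fm]
  simp only [fm?] at h
  cases hx : fm? xs with
  | none =>
    rw [hx] at h
    simp at h
    simp [← h.1, ← h.2]
  | some p =>
    obtain ⟨mv, jx⟩ := p
    rw [hx] at h
    by_cases hm : mv ≤ x
    · simp [hm] at h
      simp [show ¬ (mv > x) from by omega, ← h.1, ← h.2]
    · simp [hm] at h
      simp only [show mv > x from by omega, if_true]
      rw [← h.1, ← h.2]
      congr 1
      push_cast
      ring

-- the running max over a list whose maximum is mD equals mD
theorem foldl_max_eq (D' : List Int) (d0 mD : Int)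
    (hmem : mD ∈ d0 :: D') (hle : ∀ y ∈ d0 :: D', y ≤ mD) :
    D'.foldl max d0 = mD := by
  apply le_antisymm
  · rcases PySem.List.foldl_max_mem D' d0 with h | h
    · rw [h]; exact hle d0 (by simp)
    · exact hle _ (List.mem_cons_of_mem d0 h)
  · rcases List.mem_cons.mp hmem with rfl | h
    · exact (PySem.List.le_foldl_max D' mD).1
    · exact (PySem.List.le_foldl_max D' d0).2 mD h

-- ===== VERDICT (by name: the statement is the Claim_ definition above) =====
theorem getMaxJoltageOne_spec : Claim_equal_getMaxJoltageOne := by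
  intro bank _ hpre
  unfold Spec_getMaxJoltageOne
  have hbne : bank ≠ [] := by intro h; subst h; simp [Pre_getMaxJoltageOne] at hpre
  obtain ⟨L, t, rfl⟩ : ∃ L t, bank = L ++ [t] :=
    ⟨bank.dropLast, bank.getLast hbne, (List.dropLast_concat_getLast hbne).symm⟩
  have hLlen : 1 ≤ L.length := by
    simp [Pre_getMaxJoltageOne] at hpre; omega
  have hL : L ≠ [] := by intro h; subst h; simp at hLlen
  -- the first maximum of L
  obtain ⟨m, j, hfm⟩ : ∃ m j, fm? L = some (m, j) := by
    cases h : fm? L with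
    | none => exact absurd ((fm?_eq_none_iff L).mp h) hL
    | some p => obtain ⟨m, j⟩ := p; exact ⟨m, j, rfl⟩
  have hjlt : j < L.length := fm?_index_lt L m j hfm
  have hrecs : recs L = m :: recs (L.drop (j + 1)) := recs_eq_fm L m j hfm
  -- ===== reduce A =====
  simp only [getMaxJoltageOne]
  have hb1 : (((L ++ [t]).length : Int)) - 1 = (L.length : Int) := by
    simp
  rw [hb1]
  have hcongr := PySem.List.foldl_congr_mem
    (PySem.List.pyRange 0 (L.length : Int) 1)
    (fun st i => PySem.List.pyGetD (L ++ [t]) i 0 :: popLoop (PySem.List.pyGetD (L ++ [t]) i 0) st)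
    (fun st i => PySem.List.pyGetD L i 0 :: popLoop (PySem.List.pyGetD L i 0) st)
    ([] : List Int)
    (by
      intro acc i hi
      have hi' := (PySem.List.mem_pyRange_one).mp hi
      have h1 : PySem.List.pyGetD (L ++ [t]) i 0 = PySem.List.pyGetD L i 0 := by
        rw [PySem.List.pyGetD_eq_getElem _ 0 hi'.1 (by simp; omega),
            PySem.List.pyGetD_eq_getElem _ 0 hi'.1 (by omega)]
        exact List.getElem_append_left (by omega)
      simp only [h1])
  rw [hcongr]
  rw [PySem.List.foldl_pyRange_zero_pyGetD' L 0 (fun st x => x :: popLoop x st) []]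
  rw [stackA_char L [] hL]
  simp only [List.dropWhile_nil, List.append_nil]
  rw [PySem.List.pyGetD_neg_one_append_singleton]
  rw [hrecs]
  simp only [List.reverse_cons, List.length_append, List.length_reverse, List.length_cons,
    List.length_nil, List.getLastD_concat, List.reverse_append, List.reverse_reverse,
    List.reverse_cons, List.reverse_nil, List.nil_append, List.cons_append]
  -- ===== reduce B =====
  simp only [getMaxJoltageOne_alt]
  rw [PySem.List.slice_to_neg_one, List.dropLast_concat]
  obtain ⟨x, xs, rfl⟩ : ∃ x xs, L = x :: xs := by
    cases L with
    | nil => exact absurd rfl hL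
    | cons a b => exact ⟨a, b, rfl⟩
  rw [bfold_eq_bscan (x :: xs) 1 (by omega)]
  simp only [Int.toNat_one, List.drop_succ_cons, List.drop_zero,
    PySem.List.pyGetD_zero_cons]
  rw [bscan_fm x xs m j hfm]
  have hslice : PySem.List.slice ((x :: xs) ++ [t]) (some ((j : Int) + 1)) none
      = (x :: xs).drop (j + 1) ++ [t] := by
    rw [PySem.List.slice_from _ (by omega)]
    rw [show ((j : Int) + 1).toNat = j + 1 by omega]
    exact List.drop_append_of_le_length (by omega)
  rw [hslice]
  -- ===== compare, by cases on whether anything of L follows its first maximum =====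
  simp only [List.drop_succ_cons]
  cases hD : xs.drop j with
  | nil =>
    simp [recs, PySem.List.max?_id_cons]
  | cons d0 D' =>
    obtain ⟨mD, jD, hfmD⟩ : ∃ mD jD, fm? (d0 :: D') = some (mD, jD) := by
      cases h : fm? (d0 :: D') with
      | none => exact absurd ((fm?_eq_none_iff _).mp h) (by simp)
      | some p => obtain ⟨mD, jD⟩ := p; exact ⟨mD, jD, rfl⟩
    have hrD : recs (d0 :: D') = mD :: recs ((d0 :: D').drop (jD + 1)) := recs_eq_fm _ mD jD hfmD
    obtain ⟨hmem, hle⟩ := fm?_isMax _ mD jD hfmD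
    rw [hrD]
    rw [List.cons_append, PySem.List.max?_id_cons]
    simp only [List.foldl_append, List.foldl_cons, List.foldl_nil]
    rw [foldl_max_eq D' d0 mD hmem hle]
    simp only [List.length_cons, Option.getD_some]
    rw [if_neg (by omega)]
    have hget1 : PySem.List.pyGetD (m :: mD :: recs ((d0 :: D').drop (jD + 1))) 1 0 = mD := by
      simp [PySem.List.pyGetD]
    rw [hget1]
    simp [max_comm t mD]
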